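-- pv_equiv track=rewrite | github.com/drk-c/derin-financial-coach | utils.py | classify_bill_type
-- ===== SOURCE A (Python) =====
-- def classify_bill_type(merchant, amount):
--     """Classify bill type based on merchant and amount"""
--     # Simple rule-based classification
--     merchant_lower = merchant.lower()
--
--     if any(word in merchant_lower for word in ['rent', 'apartment', 'housing']):
--         return "Rent/Mortgage"
--     elif any(word in merchant_lower for word in ['electric', 'gas', 'water', 'trash', 'disposal','utility']):
--         return "Utilities"
--     elif any(word in merchant_lower for word in ['internet', 'cable', 'wifi', 'ethernet']):
--         return "Internet/Cable"
--     elif any(word in merchant_lower for word in ['phone', 'mobile', 'cellular']):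
--         return "Phone/Mobile"
--     elif any(word in merchant_lower for word in ['insurance', 'auto', 'health']):
--         return "Insurance"
--     elif any(word in merchant_lower for word in ['netflix', 'spotify', 'subscription', 'streaming']):
--         return "Subscription"
--     elif any(word in merchant_lower for word in ['credit', 'card', 'payment']):
--         return "Credit Card"
--     elif any(word in merchant_lower for word in ['loan', 'mortgage']):
--         return "Loan Payment"
--     else:
--         return "Other"
-- ===== SOURCE B (Python) =====
-- # Text-driven multi-pattern matcher: scan every start position of the merchant
-- # string once and keep the smallest (highest-priority) rule index whose keyword
-- # starts there; the rule order encodes the priority of the original chain.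
-- KEYWORDS = [
--     ("rent", "Rent/Mortgage"), ("apartment", "Rent/Mortgage"), ("housing", "Rent/Mortgage"),
--     ("electric", "Utilities"), ("gas", "Utilities"), ("water", "Utilities"),
--     ("trash", "Utilities"), ("disposal", "Utilities"), ("utility", "Utilities"),
--     ("internet", "Internet/Cable"), ("cable", "Internet/Cable"), ("wifi", "Internet/Cable"), ("ethernet", "Internet/Cable"),
--     ("phone", "Phone/Mobile"), ("mobile", "Phone/Mobile"), ("cellular", "Phone/Mobile"),
--     ("insurance", "Insurance"), ("auto", "Insurance"), ("health", "Insurance"),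
--     ("netflix", "Subscription"), ("spotify", "Subscription"), ("subscription", "Subscription"), ("streaming", "Subscription"),
--     ("credit", "Credit Card"), ("card", "Credit Card"), ("payment", "Credit Card"),
--     ("loan", "Loan Payment"), ("mortgage", "Loan Payment"),
-- ]
--
-- def classify_bill_type(merchant, amount):
--     """Classify bill type based on merchant and amount"""
--     m = merchant.lower()
--     idx = len(KEYWORDS)
--     for i in range(len(m) + 1):
--         for j, (kw, _label) in enumerate(KEYWORDS):
--             if j < idx and m.startswith(kw, i):
--                 idx = j
--     return KEYWORDS[idx][1] if idx < len(KEYWORDS) else "Other"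
-- ===== Notes on version B (the rewrite author's own statement) =====
-- stated objective: alternative
-- what changed: Replaced the rule-driven elif chain of per-keyword substring searches with a text-driven multi-pattern scan: one pass over every start position of the lowercased merchant, keeping the minimal (highest-priority) rule index whose keyword starts there, then mapping that index to its label.
import Mathlib
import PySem

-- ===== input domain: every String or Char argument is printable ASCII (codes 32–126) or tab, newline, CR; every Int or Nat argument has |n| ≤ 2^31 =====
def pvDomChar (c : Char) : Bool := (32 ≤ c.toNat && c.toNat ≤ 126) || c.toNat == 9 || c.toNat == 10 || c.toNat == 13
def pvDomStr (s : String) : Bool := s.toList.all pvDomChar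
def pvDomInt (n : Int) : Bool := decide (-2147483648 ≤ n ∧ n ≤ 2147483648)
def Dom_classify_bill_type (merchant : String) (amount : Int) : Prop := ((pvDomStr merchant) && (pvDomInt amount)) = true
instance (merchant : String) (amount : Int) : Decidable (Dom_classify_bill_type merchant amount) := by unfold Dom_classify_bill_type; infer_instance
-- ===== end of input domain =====

-- B replaces A's rule-driven elif chain of substring searches by a text-driven scan: one pass over
-- the start positions of the lowercased merchant, keeping the minimal (highest-priority) matching
-- rule index (alternative algorithm, same observable behaviour).

-- ===== PORT A =====
def classify_bill_type (merchant : String) (amount : Int) : String :=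
  let merchant_lower := PySem.Str.lower merchant
  if ["rent", "apartment", "housing"].any (fun w => PySem.Str.isIn w merchant_lower) then
    "Rent/Mortgage"
  else if ["electric", "gas", "water", "trash", "disposal", "utility"].any (fun w => PySem.Str.isIn w merchant_lower) then
    "Utilities"
  else if ["internet", "cable", "wifi", "ethernet"].any (fun w => PySem.Str.isIn w merchant_lower) then
    "Internet/Cable"
  else if ["phone", "mobile", "cellular"].any (fun w => PySem.Str.isIn w merchant_lower) then
    "Phone/Mobile"
  else if ["insurance", "auto", "health"].any (fun w => PySem.Str.isIn w merchant_lower) then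
    "Insurance"
  else if ["netflix", "spotify", "subscription", "streaming"].any (fun w => PySem.Str.isIn w merchant_lower) then
    "Subscription"
  else if ["credit", "card", "payment"].any (fun w => PySem.Str.isIn w merchant_lower) then
    "Credit Card"
  else if ["loan", "mortgage"].any (fun w => PySem.Str.isIn w merchant_lower) then
    "Loan Payment"
  else
    "Other"

-- ===== PORT B =====
def pvKeywords : List (String × String) :=
  [("rent", "Rent/Mortgage"), ("apartment", "Rent/Mortgage"), ("housing", "Rent/Mortgage"),
   ("electric", "Utilities"), ("gas", "Utilities"), ("water", "Utilities"),
   ("trash", "Utilities"), ("disposal", "Utilities"), ("utility", "Utilities"),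
   ("internet", "Internet/Cable"), ("cable", "Internet/Cable"), ("wifi", "Internet/Cable"), ("ethernet", "Internet/Cable"),
   ("phone", "Phone/Mobile"), ("mobile", "Phone/Mobile"), ("cellular", "Phone/Mobile"),
   ("insurance", "Insurance"), ("auto", "Insurance"), ("health", "Insurance"),
   ("netflix", "Subscription"), ("spotify", "Subscription"), ("subscription", "Subscription"), ("streaming", "Subscription"),
   ("credit", "Credit Card"), ("card", "Credit Card"), ("payment", "Credit Card"),
   ("loan", "Loan Payment"), ("mortgage", "Loan Payment")]

def classify_bill_type_alt (merchant : String) (amount : Int) : String :=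
  let m := (PySem.Str.lower merchant).toList
  -- range(len(m)+1) is a nonnegative unit-step range, ported as List.range;
  -- m.startswith(kw, i) with 0 ≤ i is exactly "kw is a prefix of m[i:]" (PySem.Chars.startswith on m.drop i)
  let idx := (List.range (m.length + 1)).foldl
    (fun idx i =>
      (PySem.List.enumerate pvKeywords 0).foldl
        (fun b p => if p.1 < b ∧ PySem.Chars.startswith (m.drop i) p.2.1.toList then p.1 else b)
        idx)
    ((pvKeywords.length : Int))
  if idx < (pvKeywords.length : Int) then
    ((PySem.List.pyGet? pvKeywords idx).map Prod.snd).getD "Other"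
  else "Other"

-- ===== PRECONDITION & SPEC =====
def Spec_classify_bill_type (merchant : String) (amount : Int) (out : String) : Prop := out = classify_bill_type_alt merchant amount
instance (merchant : String) (amount : Int) (out : String) : Decidable (Spec_classify_bill_type merchant amount out) := by unfold Spec_classify_bill_type; infer_instance

-- ===== CLAIM (what is proved, stated in full; the proofs are below) =====
def Claim_equal_classify_bill_type : Prop := ∀ (merchant : String) (amount : Int), Dom_classify_bill_type merchant amount → Spec_classify_bill_type merchant amount (classify_bill_type merchant amount)

-- ===== LEMMAS AND PROOFS =====

-- index carried by an optional findIdx? result, defaulting to the table length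
def pvIdxD (o : Option Nat) : Int :=
  match o with
  | some t => (t : Int)
  | none => (pvKeywords.length : Int)

-- "min of accumulator b and the offset index", the value of B's inner loop
def pvMinIdx (b s : Int) (o : Option Nat) : Int :=
  match o with
  | some t => min b (s + (t : Int))
  | none => b

-- priority index of the first rule whose keyword occurs anywhere in m (table length if none)
def pvJ (m : List Char) : Int :=
  pvIdxD (pvKeywords.findIdx? (fun x => PySem.Chars.isIn x.1.toList m))

-- priority index of the first rule whose keyword starts at position i of m (table length if none)
def pvF (m : List Char) (i : Nat) : Int :=
  pvIdxD (pvKeywords.findIdx? (fun x => PySem.Chars.startswith (m.drop i) x.1.toList))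

-- B's inner loop over enumerate is "min of the accumulator and the first matching index"
theorem pvInner (L : List (String × String)) (Q : String × String → Bool) :
    ∀ (s b : Int),
    (PySem.List.enumerate L s).foldl (fun b p => if p.1 < b ∧ Q p.2 then p.1 else b) b
    = pvMinIdx b s (L.findIdx? Q) := by
  induction L with
  | nil => intro s b; simp [PySem.List.enumerate_nil, pvMinIdx]
  | cons x xs ih =>
    intro s b
    rw [PySem.List.enumerate_cons, List.findIdx?_cons]
    cases hQ : Q x with
    | false =>
      simp only [List.foldl_cons, hQ]
      rw [if_neg (by simp), if_neg (by simp), ih (s + 1) b]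
      cases h : xs.findIdx? Q with
      | none => simp [pvMinIdx]
      | some t => simp only [Option.map_some, pvMinIdx]; omega
    | true =>
      simp only [List.foldl_cons, hQ]
      rw [if_pos trivial]
      by_cases hb : s < b
      · rw [if_pos (by simp [hb]), ih (s + 1) s]
        cases h : xs.findIdx? Q with
        | none => simp only [pvMinIdx]; omega
        | some t => simp only [pvMinIdx]; omega
      · rw [if_neg (by simp [hb]), ih (s + 1) b]
        cases h : xs.findIdx? Q with
        | none => simp only [pvMinIdx]; omega
        | some t => simp only [pvMinIdx]; omega

-- pvMinIdx is min with pvF when the accumulator is at most the table length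
theorem pvMinIdx_eq_min (m : List Char) (i : Nat) (b : Int) (hb : b ≤ (pvKeywords.length : Int)) :
    pvMinIdx b 0 (pvKeywords.findIdx? (fun x => PySem.Chars.startswith (m.drop i) x.1.toList))
    = min b (pvF m i) := by
  unfold pvF
  cases h : pvKeywords.findIdx? (fun x => PySem.Chars.startswith (m.drop i) x.1.toList) with
  | none => simp only [pvMinIdx, pvIdxD]; omega
  | some t => simp only [pvMinIdx, pvIdxD]; omega

-- B's outer loop is a running minimum of pvF, as long as the accumulator stays ≤ |pvKeywords|
theorem pvOuter (m : List Char) (l : List Nat) :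
    ∀ (b : Int), b ≤ (pvKeywords.length : Int) →
    l.foldl
      (fun idx i =>
        (PySem.List.enumerate pvKeywords 0).foldl
          (fun b p => if p.1 < b ∧ PySem.Chars.startswith (m.drop i) p.2.1.toList then p.1 else b)
          idx)
      b
    = l.foldl (fun b i => min b (pvF m i)) b := by
  induction l with
  | nil => intro b _; simp
  | cons i l ih =>
    intro b hb
    simp only [List.foldl_cons]
    rw [pvInner pvKeywords (fun x => PySem.Chars.startswith (m.drop i) x.1.toList) 0 b,
      pvMinIdx_eq_min m i b hb]
    exact ih (min b (pvF m i)) (le_trans (min_le_left _ _) hb)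

-- running-minimum bounds
theorem pvFoldlMin_le_init (f : Nat → Int) (l : List Nat) : ∀ b, l.foldl (fun b i => min b (f i)) b ≤ b := by
  induction l with
  | nil => intro b; simp
  | cons i l ih => intro b; exact le_trans (ih _) (min_le_left _ _)

theorem pvFoldlMin_le (f : Nat → Int) (l : List Nat) : ∀ b, ∀ i ∈ l, l.foldl (fun b j => min b (f j)) b ≤ f i := by
  induction l with
  | nil => intro b i h; simp at h
  | cons j l ih =>
    intro b i h
    rcases List.mem_cons.mp h with rfl | h
    · exact le_trans (pvFoldlMin_le_init f l _) (min_le_right _ _)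
    · exact ih _ i h

theorem pvLe_foldlMin (f : Nat → Int) (l : List Nat) : ∀ b c, c ≤ b → (∀ i ∈ l, c ≤ f i) → c ≤ l.foldl (fun b i => min b (f i)) b := by
  induction l with
  | nil => intro b c hc _; simpa using hc
  | cons j l ih =>
    intro b c hc hf
    exact ih _ c (le_min hc (hf j (List.mem_cons_self))) (fun i hi => hf i (List.mem_cons_of_mem _ hi))

-- a keyword starting at position i occurs in m
theorem pvStarts_isIn (m : List Char) (i : Nat) (w : List Char)
    (h : PySem.Chars.startswith (m.drop i) w = true) : PySem.Chars.isIn w m = true :=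
  (PySem.Chars.exists_prefix_drop_iff_isIn _ _).mp ⟨i, (PySem.Chars.startswith_iff _ _).mp h⟩

-- a nonempty keyword occurring in m starts at some position i ≤ |m|
theorem pvIsIn_starts (m : List Char) (w : List Char) (hw : w ≠ [])
    (h : PySem.Chars.isIn w m = true) : ∃ i ≤ m.length, PySem.Chars.startswith (m.drop i) w = true := by
  obtain ⟨j, hj⟩ := (PySem.Chars.exists_prefix_drop_iff_isIn _ _).mpr h
  refine ⟨min j m.length, Nat.min_le_right _ _, ?_⟩
  rcases Nat.le_total j m.length with hle | hle
  · rw [Nat.min_eq_left hle]; exact (PySem.Chars.startswith_iff _ _).mpr hj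
  · exfalso
    have hd : m.drop j = [] := List.drop_eq_nil_of_le hle
    rw [hd] at hj
    exact hw (List.prefix_nil.mp hj)

-- core: the running minimum of pvF over all positions is pvJ
theorem pvMin_eq_J (m : List Char) :
    (List.range (m.length + 1)).foldl (fun b i => min b (pvF m i)) (pvKeywords.length : Int) = pvJ m := by
  have hne : ∀ x ∈ pvKeywords, x.1.toList ≠ [] := by decide
  apply le_antisymm
  · -- ≤ : if pvJ is an index t, some position realises an index ≤ t
    unfold pvJ
    cases h : pvKeywords.findIdx? (fun x => PySem.Chars.isIn x.1.toList m) with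
    | none => simpa [pvIdxD] using pvFoldlMin_le_init (pvF m) _ _
    | some t =>
      obtain ⟨ht, hP, _⟩ := List.findIdx?_eq_some_iff_getElem.mp h
      obtain ⟨i, hi, hR⟩ := pvIsIn_starts m (pvKeywords[t].1.toList) (hne _ (List.getElem_mem ht)) hP
      have hFi : pvF m i ≤ (t : Int) := by
        unfold pvF
        cases hfi : pvKeywords.findIdx? (fun x => PySem.Chars.startswith (m.drop i) x.1.toList) with
        | none =>
          exfalso
          have := List.findIdx?_eq_none_iff.mp hfi _ (List.getElem_mem ht)
          simp [hR] at this
        | some u =>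
          obtain ⟨hu, _, humin⟩ := List.findIdx?_eq_some_iff_getElem.mp hfi
          have hut : u ≤ t := by
            by_contra hlt
            exact humin t (by omega) hR
          simp only [pvIdxD]
          exact_mod_cast hut
      exact le_trans (pvFoldlMin_le (pvF m) _ _ i (List.mem_range.mpr (by omega))) hFi
  · -- ≥ : pvJ is a lower bound of the initial value and of every pvF
    apply pvLe_foldlMin
    · unfold pvJ
      cases h : pvKeywords.findIdx? (fun x => PySem.Chars.isIn x.1.toList m) with
      | none => simp [pvIdxD]
      | some t =>
        have := (List.findIdx?_eq_some_iff_getElem.mp h).fst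
        simp only [pvIdxD]
        exact le_of_lt (by exact_mod_cast this)
    · intro i _
      unfold pvF
      cases hfi : pvKeywords.findIdx? (fun x => PySem.Chars.startswith (m.drop i) x.1.toList) with
      | none =>
        unfold pvJ
        cases h : pvKeywords.findIdx? (fun x => PySem.Chars.isIn x.1.toList m) with
        | none => simp [pvIdxD]
        | some t =>
          have := (List.findIdx?_eq_some_iff_getElem.mp h).fst
          simp only [pvIdxD]
          exact le_of_lt (by exact_mod_cast this)
      | some u =>
        obtain ⟨hu, hR, _⟩ := List.findIdx?_eq_some_iff_getElem.mp hfi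
        have hP : PySem.Chars.isIn (pvKeywords[u].1.toList) m = true := pvStarts_isIn m i _ hR
        unfold pvJ
        cases h : pvKeywords.findIdx? (fun x => PySem.Chars.isIn x.1.toList m) with
        | none =>
          exfalso
          have := List.findIdx?_eq_none_iff.mp h _ (List.getElem_mem hu)
          simp [hP] at this
        | some t =>
          obtain ⟨ht, _, htmin⟩ := List.findIdx?_eq_some_iff_getElem.mp h
          have htu : t ≤ u := by
            by_contra hlt
            exact htmin u (by omega) hP
          simp only [pvIdxD]
          exact_mod_cast htu

-- B computed through pvJ
theorem pvAlt_eq (merchant : String) (amount : Int) :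
    classify_bill_type_alt merchant amount
    = (let m := (PySem.Str.lower merchant).toList
       match pvKeywords.find? (fun x => PySem.Chars.isIn x.1.toList m) with
       | some p => p.2
       | none => "Other") := by
  show (let m := (PySem.Str.lower merchant).toList
    let idx := (List.range (m.length + 1)).foldl
      (fun idx i =>
        (PySem.List.enumerate pvKeywords 0).foldl
          (fun b p => if p.1 < b ∧ PySem.Chars.startswith (m.drop i) p.2.1.toList then p.1 else b)
          idx)
      ((pvKeywords.length : Int))
    if idx < (pvKeywords.length : Int) then
      ((PySem.List.pyGet? pvKeywords idx).map Prod.snd).getD "Other"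
    else "Other") = _
  simp only
  simp only [PySem.Str.toList_lower]
  rw [pvOuter _ _ _ le_rfl, pvMin_eq_J]
  cases h : pvKeywords.findIdx? (fun x => PySem.Chars.isIn x.1.toList (PySem.Chars.lower merchant.toList)) with
  | none =>
    have hfind : pvKeywords.find? (fun x => PySem.Chars.isIn x.1.toList (PySem.Chars.lower merchant.toList)) = none :=
      List.find?_eq_none.mpr (fun x hx => by simp [List.findIdx?_eq_none_iff.mp h x hx])
    simp [pvJ, h, pvIdxD, hfind]
  | some t =>
    obtain ⟨ht, hP, hmin⟩ := List.findIdx?_eq_some_iff_getElem.mp h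
    have hfind : pvKeywords.find? (fun x => PySem.Chars.isIn x.1.toList (PySem.Chars.lower merchant.toList)) = some (pvKeywords[t]) :=
      List.find?_eq_some_iff_getElem.mpr ⟨hP, t, ht, rfl, fun j hj => by simp [hmin j hj]⟩
    have hlt : (t : Int) < (pvKeywords.length : Int) := by exact_mod_cast ht
    simp only [pvJ, h, pvIdxD, hfind, if_pos hlt, PySem.List.pyGet?_natCast pvKeywords t,
      List.getElem?_eq_getElem ht]
    rfl

-- A computed through the same find? over the group structure of the table
theorem pvFind_group (ws : List String) (label : String) (rest : List (String × String)) (m : List Char) :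
    (match (((ws.map (fun w => (w, label))) ++ rest).find? (fun x => PySem.Chars.isIn x.1.toList m)) with
     | some p => p.2 | none => "Other")
    = if ws.any (fun w => PySem.Chars.isIn w.toList m) then label
      else (match (rest.find? (fun x => PySem.Chars.isIn x.1.toList m)) with
            | some p => p.2 | none => "Other") := by
  induction ws with
  | nil => simp
  | cons w ws ih =>
    simp only [List.map_cons, List.cons_append, List.find?_cons, List.any_cons]
    rcases Bool.eq_false_or_eq_true (PySem.Chars.isIn w.toList m) with h | h <;>
      simp only [h, Bool.false_or, Bool.true_or] <;> simp <;> simpa using ih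

theorem pvRules_groups : pvKeywords =
    (["rent", "apartment", "housing"].map (fun w => (w, "Rent/Mortgage"))) ++
    ((["electric", "gas", "water", "trash", "disposal", "utility"].map (fun w => (w, "Utilities"))) ++
    ((["internet", "cable", "wifi", "ethernet"].map (fun w => (w, "Internet/Cable"))) ++
    ((["phone", "mobile", "cellular"].map (fun w => (w, "Phone/Mobile"))) ++
    ((["insurance", "auto", "health"].map (fun w => (w, "Insurance"))) ++
    ((["netflix", "spotify", "subscription", "streaming"].map (fun w => (w, "Subscription"))) ++
    ((["credit", "card", "payment"].map (fun w => (w, "Credit Card"))) ++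
    ((["loan", "mortgage"].map (fun w => (w, "Loan Payment"))) ++ ([] : List (String × String))))))))) := by
  rfl

theorem classify_bill_type_eq_alt (merchant : String) (amount : Int) :
    classify_bill_type merchant amount = classify_bill_type_alt merchant amount := by
  rw [pvAlt_eq]
  simp only [classify_bill_type, pvRules_groups, pvFind_group, List.find?_nil,
    PySem.Str.isIn_eq]
  rfl

-- ===== VERDICT (by name: the statement is the Claim_ definition above) =====
theorem classify_bill_type_spec : Claim_equal_classify_bill_type := by
  intro merchant amount _
  unfold Spec_classify_bill_type
  exact classify_bill_type_eq_alt merchant amount
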